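-- pv_equiv track=rewrite | github.com/ununtrium/math-prm | src/utils.py | reduce_step_count
-- ===== SOURCE A (Python) =====
-- def reduce_step_count(steps, target_max=15, min_chars=50):
--     if len(steps) <= target_max: return steps
--
--     merged_steps = []
--     buffer = ""
--     for i, step in enumerate(steps):
--         if i == 0:
--             buffer = step
--             continue
--
--         if len(step) < min_chars or len(buffer) < min_chars:
--             buffer += "\n" + step
--         else:
--             merged_steps.append(buffer)
--             buffer = step
--
--     if buffer: merged_steps.append(buffer)
--
--     while len(merged_steps) > target_max:
--         new_merged = []
--         for i in range(0, len(merged_steps), 2):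
--             if i + 1 < len(merged_steps):
--                 new_merged.append(merged_steps[i] + "\n" + merged_steps[i+1])
--             else:
--                 new_merged.append(merged_steps[i])
--         merged_steps = new_merged
--         if len(merged_steps) <= 1: break
--
--     return merged_steps
-- ===== SOURCE B (Python) =====
-- def reduce_step_count(steps, target_max=15, min_chars=50):
--     if len(steps) <= target_max:
--         return steps
--
--     # Phase 1: group consecutive steps; a group is flushed only when both the
--     # joined length so far and the next step reach min_chars.  Groups are kept
--     # as lists of steps (no string concatenation here).
--     groups = []
--     cur, clen = [], 0          # clen == len("\n".join(cur))
--     for step in steps: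
--         if cur and len(step) >= min_chars and clen >= min_chars:
--             groups.append(cur)
--             cur, clen = [step], len(step)
--         elif cur:
--             cur.append(step)
--             clen += 1 + len(step)
--         else:
--             cur, clen = [step], len(step)
--     if cur and clen > 0:
--         groups.append(cur)
--
--     # Phase 2: decide, on counts alone, how many pairwise-halving rounds the
--     # merge loop would take; each final block is then 'size' consecutive groups.
--     n, size = len(groups), 1
--     while n > target_max:
--         n = (n + 1) // 2
--         size *= 2
--         if n <= 1:
--             break
--
--     # Join each final block exactly once.
--     return ["\n".join(s for g in groups[i:i + size] for s in g)
--             for i in range(0, len(groups), size)]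
-- ===== Notes on version B (the rewrite author's own statement) =====
-- stated objective: alternative
-- what changed: B groups steps as lists (tracking the joined length arithmetically instead of concatenating strings), simulates A's pairwise-halving while-loop on the group count alone to get the final block size, and joins each output block exactly once instead of re-concatenating every string in every halving round.
import Mathlib
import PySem

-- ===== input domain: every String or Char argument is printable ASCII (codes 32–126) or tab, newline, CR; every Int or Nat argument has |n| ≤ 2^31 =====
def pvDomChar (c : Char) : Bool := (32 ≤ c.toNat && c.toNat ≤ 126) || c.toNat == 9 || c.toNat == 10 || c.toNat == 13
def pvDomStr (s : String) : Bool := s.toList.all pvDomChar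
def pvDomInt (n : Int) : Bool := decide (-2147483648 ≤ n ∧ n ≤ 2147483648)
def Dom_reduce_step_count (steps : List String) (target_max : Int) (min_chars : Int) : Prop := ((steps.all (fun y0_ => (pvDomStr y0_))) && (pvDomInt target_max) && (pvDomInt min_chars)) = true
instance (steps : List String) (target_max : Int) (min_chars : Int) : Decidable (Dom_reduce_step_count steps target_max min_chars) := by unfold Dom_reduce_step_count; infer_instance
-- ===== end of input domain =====

-- ===== PORT A =====
-- B replaces A's string-buffer grouping and repeated pairwise string halving by
-- list-of-steps groups, a count-only halving simulation, and one join per output block: no string is copied more than once (measured comparable to A under CPython; objective: alternative).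

-- A's inner `for i in range(0, len(merged_steps), 2)` loop as the obvious structural recursion
def pvHalveA : List String → List String
  | a :: b :: rest => (a ++ "\n" ++ b) :: pvHalveA rest
  | l => l

theorem pvHalveA_length : ∀ (l : List String), (pvHalveA l).length = (l.length + 1) / 2
  | [] => rfl
  | [_] => by simp [pvHalveA]
  | _ :: _ :: rest => by
      simp only [pvHalveA, List.length_cons, pvHalveA_length rest]
      omega

-- A's `while len(merged_steps) > target_max: ...` loop
def pvWhileA (tm : Int) (l : List String) : List String :=
  if (l.length : Int) ≤ tm then l
  else if (pvHalveA l).length ≤ 1 then pvHalveA l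
  else pvWhileA tm (pvHalveA l)
termination_by l.length
decreasing_by
  have h := pvHalveA_length l
  omega

-- body of A's grouping loop (the state is (merged_steps, buffer); p = (i, step))
def pvStepA (mc : Int) (st : List String × String) (p : Int × String) : List String × String :=
  if p.1 = 0 then (st.1, p.2)
  else if PySem.Str.len p.2 < mc ∨ PySem.Str.len st.2 < mc then (st.1, st.2 ++ "\n" ++ p.2)
  else (st.1 ++ [st.2], p.2)

def reduce_step_count (steps : List String) (target_max : Int) (min_chars : Int) : List String :=
  if PySem.List.len steps ≤ target_max then steps
  else
    let st := (PySem.List.enumerate steps).foldl (pvStepA min_chars) ([], "")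
    let merged := if st.2 ≠ "" then st.1 ++ [st.2] else st.1
    pvWhileA target_max merged

-- ===== PORT B =====
-- `"\n".join(parts)` (exact: separator folded in between the parts, "" on the empty list)
def pvNjoin : List String → String
  | [] => ""
  | [s] => s
  | s :: rest => s ++ "\n" ++ pvNjoin rest

-- body of B's grouping loop; state = (groups, cur, clen)
def pvStepB (mc : Int) (st : List (List String) × List String × Int) (step : String) :
    List (List String) × List String × Int :=
  if st.2.1 ≠ [] ∧ mc ≤ PySem.Str.len step ∧ mc ≤ st.2.2 then
    (st.1 ++ [st.2.1], [step], PySem.Str.len step)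
  else if st.2.1 ≠ [] then (st.1, st.2.1 ++ [step], st.2.2 + 1 + PySem.Str.len step)
  else (st.1, [step], PySem.Str.len step)

-- B's `groups[i:i+size] for i in range(0, len(groups), size)`: consecutive blocks of m+1 elements
def pvChunk {α : Type} (m : Nat) : List α → List (List α)
  | [] => []
  | x :: xs => (x :: xs.take m) :: pvChunk m (xs.drop m)
termination_by l => l.length
decreasing_by simp only [List.length_drop, List.length_cons]; omega

-- B's `while n > target_max` count loop, returning the final block size
def pvRounds (tm : Int) (n : Nat) (size : Nat) : Nat :=
  if (n : Int) ≤ tm then size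
  else if (n + 1) / 2 ≤ 1 then 2 * size
  else pvRounds tm ((n + 1) / 2) (2 * size)
termination_by n
decreasing_by omega

def reduce_step_count_alt (steps : List String) (target_max : Int) (min_chars : Int) : List String :=
  if PySem.List.len steps ≤ target_max then steps
  else
    let st := steps.foldl (pvStepB min_chars) ([], [], 0)
    let groups := if st.2.1 ≠ [] ∧ 0 < st.2.2 then st.1 ++ [st.2.1] else st.1
    let size := pvRounds target_max groups.length 1
    (pvChunk (size - 1) groups).map (fun c => pvNjoin c.flatten)

-- ===== PRECONDITION & SPEC =====
def Spec_reduce_step_count (steps : List String) (target_max : Int) (min_chars : Int) (out : List String) : Prop := out = reduce_step_count_alt steps target_max min_chars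
instance (steps : List String) (target_max : Int) (min_chars : Int) (out : List String) : Decidable (Spec_reduce_step_count steps target_max min_chars out) := by unfold Spec_reduce_step_count; infer_instance

-- ===== CLAIM (what is proved, stated in full; the proofs are below) =====
def Claim_equal_reduce_step_count : Prop := ∀ (steps : List String) (target_max : Int) (min_chars : Int), Dom_reduce_step_count steps target_max min_chars → Spec_reduce_step_count steps target_max min_chars (reduce_step_count steps target_max min_chars)

-- ===== LEMMAS AND PROOFS =====

theorem pvNjoin_append (xs ys : List String) (hx : xs ≠ []) (hy : ys ≠ []) :
    pvNjoin (xs ++ ys) = pvNjoin xs ++ "\n" ++ pvNjoin ys := by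
  induction xs with
  | nil => simp at hx
  | cons a t ih =>
    cases t with
    | nil =>
      cases ys with
      | nil => simp at hy
      | cons b u => simp [pvNjoin]
    | cons c u =>
      have e1 : pvNjoin (a :: c :: (u ++ ys)) = a ++ "\n" ++ pvNjoin (c :: (u ++ ys)) := rfl
      have e2 : pvNjoin (a :: c :: u) = a ++ "\n" ++ pvNjoin (c :: u) := rfl
      have e3 := ih (by simp)
      simp only [List.cons_append] at *
      rw [e1, e3, e2]
      simp [String.append_assoc]

theorem pvStrLen_append3 (a b : String) :
    PySem.Str.len (a ++ "\n" ++ b) = PySem.Str.len a + 1 + PySem.Str.len b := by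
  simp [PySem.Str.len_eq]; ring

theorem pvStrLen_pos_iff (s : String) : 0 < PySem.Str.len s ↔ s ≠ "" := by
  rw [PySem.Str.len_eq]
  constructor
  · intro h he; subst he; simp at h
  · intro h
    have h2 : s.toList ≠ [] := by
      intro hn
      have hs : s.toList = "".toList := by simpa using hn
      exact h (String.toList_inj.mp hs)
    have := List.length_pos_iff.mpr h2
    omega

theorem pvChunk_zero {α : Type} (gs : List α) : pvChunk 0 gs = gs.map (fun g => [g]) := by
  induction gs with
  | nil => rw [pvChunk]; simp
  | cons x xs ih => rw [pvChunk]; simp [ih]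

theorem pvChunk_mem {α : Type} (m : Nat) (gs : List α) (c : List α) (hc : c ∈ pvChunk m gs) :
    c ≠ [] ∧ ∀ g ∈ c, g ∈ gs := by
  match gs with
  | [] => rw [pvChunk] at hc; simp at hc
  | x :: xs =>
    rw [pvChunk] at hc
    rcases List.mem_cons.mp hc with h | h
    · subst h
      refine ⟨by simp, ?_⟩
      intro g hg
      rcases List.mem_cons.mp hg with h' | h'
      · subst h'; exact List.mem_cons_self
      · exact List.mem_cons_of_mem _ (List.take_subset _ _ h')
    · have ih := pvChunk_mem m (xs.drop m) c h
      exact ⟨ih.1, fun g hg => List.mem_cons_of_mem _ (List.drop_subset _ _ (ih.2 g hg))⟩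
termination_by gs.length
decreasing_by simp only [List.length_drop, List.length_cons]; omega

theorem pvFlatten_ne (c : List (List String)) (hne : c ≠ []) (h : ∀ g ∈ c, g ≠ []) :
    c.flatten ≠ [] := by
  match c with
  | [] => exact absurd rfl hne
  | g :: t =>
    simp only [List.flatten_cons]
    exact List.append_ne_nil_of_left_ne_nil (h g (by simp)) _

-- one halving round on the joined chunks = doubling the chunk size
theorem pvHalve_chunk (m : Nat) (gs : List (List String)) (h : ∀ g ∈ gs, g ≠ []) :
    pvHalveA ((pvChunk m gs).map (fun c => pvNjoin c.flatten)) =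
      (pvChunk (2 * m + 1) gs).map (fun c => pvNjoin c.flatten) := by
  match gs with
  | [] => rw [pvChunk, pvChunk]; rw [show pvHalveA (List.map _ []) = [] from rfl]; simp
  | x :: xs =>
    rcases hd : xs.drop m with _ | ⟨y, ys⟩
    · -- xs.length ≤ m : a single chunk on both sides
      have hlen : xs.length ≤ m := by
        have := congrArg List.length hd; simp at this; omega
      rw [pvChunk, pvChunk, hd]
      rw [pvChunk, List.drop_eq_nil_of_le (by omega : xs.length ≤ 2 * m + 1)]
      rw [pvChunk]
      rw [List.take_of_length_le hlen, List.take_of_length_le (by omega)]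
      rfl
    · -- at least two chunks: halve merges the first two
      have hxne : x ≠ [] := h x (by simp)
      have hyxs : y ∈ xs := List.drop_subset _ _ (hd ▸ List.mem_cons_self)
      have hyne : y ≠ [] := h y (List.mem_cons_of_mem _ hyxs)
      have hsub : ∀ g ∈ ys.drop m, g ∈ x :: xs := by
        intro g hg
        have h1 : g ∈ ys := List.drop_subset _ _ hg
        have h2 : g ∈ xs.drop m := hd ▸ List.mem_cons_of_mem _ h1
        exact List.mem_cons_of_mem _ (List.drop_subset _ _ h2)
      have ih := pvHalve_chunk m (ys.drop m) (fun g hg => h g (hsub g hg))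
      rw [pvChunk, hd, pvChunk]
      simp only [List.map_cons]
      rw [show ∀ (a b : String) (l : List String), pvHalveA (a :: b :: l) = (a ++ "\n" ++ b) :: pvHalveA l
            from fun a b l => rfl]
      rw [ih]
      -- rebuild the right-hand side
      rw [pvChunk]
      have htk : xs.take (2 * m + 1) = xs.take m ++ y :: ys.take m := by
        rw [show 2 * m + 1 = m + (m + 1) by omega, List.take_add, hd]
        rfl
      have hdr : xs.drop (2 * m + 1) = ys.drop m := by
        rw [show 2 * m + 1 = (m + 1) + m by omega, ← List.drop_drop, ← List.drop_drop, hd]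
        rfl
      rw [htk, hdr, List.map_cons]
      congr 1
      -- joined first block = first ++ "\n" ++ second
      have hf1 : (x :: xs.take m).flatten ≠ [] :=
        pvFlatten_ne _ (by simp) (by
          intro g hg
          rcases List.mem_cons.mp hg with h' | h'
          · subst h'; exact hxne
          · exact h g (List.mem_cons_of_mem _ (List.take_subset _ _ h')))
      have hf2 : (y :: ys.take m).flatten ≠ [] :=
        pvFlatten_ne _ (by simp) (by
          intro g hg
          rcases List.mem_cons.mp hg with h' | h'
          · subst h'; exact hyne
          · have hg1 : g ∈ ys := List.take_subset _ _ h'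
            have hg2 : g ∈ xs.drop m := hd ▸ List.mem_cons_of_mem _ hg1
            exact h g (List.mem_cons_of_mem _ (List.drop_subset _ _ hg2)))
      rw [← pvNjoin_append _ _ hf1 hf2, ← List.flatten_append]
      simp
termination_by gs.length
decreasing_by
  have h1 := congrArg List.length hd
  simp only [List.length_drop, List.length_cons] at h1 ⊢
  omega

-- the while-loop on joined chunks = chunking with the size the count loop returns
theorem pvWhile_rounds (tm : Int) (m : Nat) (gs : List (List String)) (h : ∀ g ∈ gs, g ≠ []) :
    pvWhileA tm ((pvChunk m gs).map (fun c => pvNjoin c.flatten)) =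
      (pvChunk (pvRounds tm ((pvChunk m gs).map (fun c => pvNjoin c.flatten)).length (m + 1) - 1) gs).map
        (fun c => pvNjoin c.flatten) := by
  rw [pvWhileA, pvRounds]
  by_cases h0 : ((((pvChunk m gs).map (fun c => pvNjoin c.flatten)).length : Int) ≤ tm)
  · rw [if_pos h0, if_pos h0]
    simp
  · rw [if_neg h0, if_neg h0]
    have hh := pvHalve_chunk m gs h
    have hlen : (pvHalveA ((pvChunk m gs).map (fun c => pvNjoin c.flatten))).length =
        (((pvChunk m gs).map (fun c => pvNjoin c.flatten)).length + 1) / 2 := pvHalveA_length _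
    by_cases h1 : (((pvChunk m gs).map (fun c => pvNjoin c.flatten)).length + 1) / 2 ≤ 1
    · rw [if_pos h1, if_pos (by omega)]
      rw [hh, show 2 * (m + 1) - 1 = 2 * m + 1 by omega]
    · rw [if_neg h1, if_neg (by omega)]
      rw [hh]
      have ih := pvWhile_rounds tm (2 * m + 1) gs h
      rw [ih]
      rw [← hh, hlen]
      rw [show 2 * m + 1 + 1 = 2 * (m + 1) by omega]
termination_by ((pvChunk m gs).map (fun c => pvNjoin c.flatten)).length
decreasing_by
  rw [← pvHalve_chunk m gs h]
  have := pvHalveA_length ((pvChunk m gs).map (fun c => pvNjoin c.flatten))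
  omega

-- the grouping loops keep states related: A's list is B's groups joined, A's buffer is B's
-- current group joined, and B's clen is the buffer's length
theorem pvFold_rel (mc : Int) (rest : List String) :
    ∀ (k : Int), 1 ≤ k → ∀ (gs : List (List String)) (cur : List String) (clen : Int),
      cur ≠ [] → clen = PySem.Str.len (pvNjoin cur) → (∀ g ∈ gs, g ≠ []) →
      (PySem.List.enumerate rest k).foldl (pvStepA mc) (gs.map pvNjoin, pvNjoin cur) =
          ((rest.foldl (pvStepB mc) (gs, cur, clen)).1.map pvNjoin,
            pvNjoin (rest.foldl (pvStepB mc) (gs, cur, clen)).2.1) ∧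
        (rest.foldl (pvStepB mc) (gs, cur, clen)).2.1 ≠ [] ∧
        (rest.foldl (pvStepB mc) (gs, cur, clen)).2.2 =
          PySem.Str.len (pvNjoin (rest.foldl (pvStepB mc) (gs, cur, clen)).2.1) ∧
        (∀ g ∈ (rest.foldl (pvStepB mc) (gs, cur, clen)).1, g ≠ []) := by
  induction rest with
  | nil =>
    intro k hk gs cur clen hcur hclen hgs
    rw [PySem.List.enumerate]
    exact ⟨rfl, hcur, hclen, hgs⟩
  | cons s t ih =>
    intro k hk gs cur clen hcur hclen hgs
    rw [PySem.List.enumerate_cons]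
    simp only [List.foldl_cons]
    by_cases hm : PySem.Str.len s < mc ∨ PySem.Str.len (pvNjoin cur) < mc
    · -- merge into the buffer / current group
      have ha : pvStepA mc (gs.map pvNjoin, pvNjoin cur) (k, s) =
          (gs.map pvNjoin, pvNjoin cur ++ "\n" ++ s) := by
        rw [pvStepA]
        rw [if_neg (by simp; omega), if_pos hm]
      have hb : pvStepB mc (gs, cur, clen) s = (gs, cur ++ [s], clen + 1 + PySem.Str.len s) := by
        rw [pvStepB]
        have hbc : ¬ ((gs, cur, clen).2.1 ≠ [] ∧ mc ≤ PySem.Str.len s ∧ mc ≤ (gs, cur, clen).2.2) := by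
          intro hc
          have hc2 : mc ≤ PySem.Str.len s := hc.2.1
          have hc3 : mc ≤ clen := hc.2.2
          rcases hm with hm' | hm'
          · omega
          · rw [hclen] at hc3; omega
        rw [if_neg hbc, if_pos (by simpa using hcur)]
      rw [ha, hb]
      have hj : pvNjoin cur ++ "\n" ++ s = pvNjoin (cur ++ [s]) :=
        (pvNjoin_append cur [s] hcur (by simp)).symm
      rw [hj]
      exact ih (k + 1) (by omega) gs (cur ++ [s]) (clen + 1 + PySem.Str.len s)
        (by simp) (by rw [hclen, ← hj, pvStrLen_append3]) hgs
    · -- flush the buffer / current group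
      have ha : pvStepA mc (gs.map pvNjoin, pvNjoin cur) (k, s) =
          (gs.map pvNjoin ++ [pvNjoin cur], s) := by
        rw [pvStepA]
        rw [if_neg (by simp; omega), if_neg hm]
      have hb : pvStepB mc (gs, cur, clen) s = (gs ++ [cur], [s], PySem.Str.len s) := by
        rw [pvStepB]
        have hm1 : ¬ PySem.Str.len s < mc := fun hx => hm (Or.inl hx)
        have hm2 : ¬ PySem.Str.len (pvNjoin cur) < mc := fun hx => hm (Or.inr hx)
        rw [if_pos (show (gs, cur, clen).2.1 ≠ [] ∧ mc ≤ PySem.Str.len s ∧ mc ≤ (gs, cur, clen).2.2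
              from ⟨by simpa using hcur, by omega, show mc ≤ clen by rw [hclen]; omega⟩)]
      rw [ha, hb]
      have := ih (k + 1) (by omega) (gs ++ [cur]) [s] (PySem.Str.len s)
        (by simp) (by rw [show pvNjoin [s] = s from rfl]) (by
          intro g hg
          rcases List.mem_append.mp hg with h' | h'
          · exact hgs g h'
          · simpa using (by simpa using h' : g = cur) ▸ hcur)
      simpa [pvNjoin] using this

theorem pvChunk_zero_map (gs : List (List String)) :
    (pvChunk 0 gs).map (fun c => pvNjoin c.flatten) = gs.map pvNjoin := by
  rw [pvChunk_zero, List.map_map]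
  simp [Function.comp]

-- ===== VERDICT (by name: the statement is the Claim_ definition above) =====
theorem reduce_step_count_spec : Claim_equal_reduce_step_count := by
  unfold Claim_equal_reduce_step_count Spec_reduce_step_count
  intro steps tm mc _
  unfold reduce_step_count reduce_step_count_alt
  by_cases h0 : PySem.List.len steps ≤ tm
  · rw [if_pos h0, if_pos h0]
  · rw [if_neg h0, if_neg h0]
    cases steps with
    | nil =>
      have htm : ¬ ((0 : Int) ≤ tm) := by simpa [PySem.List.len] using h0
      rw [PySem.List.enumerate]
      simp only [List.foldl_nil]
      rw [if_neg (by simp), if_neg (by simp)]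
      rw [pvWhileA, if_neg (by simpa using htm)]
      rw [show pvHalveA ([] : List String) = [] from rfl]
      rw [if_pos (by simp)]
      rw [show pvChunk (pvRounds tm (List.length ([] : List (List String))) 1 - 1)
            ([] : List (List String)) = [] from by rw [pvChunk]]
      simp
    | cons s0 rest =>
      rw [PySem.List.enumerate_cons]
      simp only [List.foldl_cons]
      have ha0 : pvStepA mc ([], "") (0, s0) = ([], s0) := by rw [pvStepA]; simp
      have hb0 : pvStepB mc ([], [], 0) s0 = ([], [s0], PySem.Str.len s0) := by
        rw [pvStepB]; simp
      rw [ha0, hb0]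
      have hrel := pvFold_rel mc rest 1 (by omega) [] [s0] (PySem.Str.len s0)
        (by simp) (by rw [show pvNjoin [s0] = s0 from rfl]) (by simp)
      rw [show ((0 : Int) + 1) = 1 from by omega]
      rw [show (([] : List (List String)).map pvNjoin, pvNjoin [s0]) = (([] : List String), s0)
            from rfl] at hrel
      obtain ⟨heq, hne, hcl, hgood⟩ := hrel
      rw [heq]
      -- the final flush: buffer nonempty ⟷ clen positive
      set b := rest.foldl (pvStepB mc) ([], [s0], PySem.Str.len s0) with hb
      have hflush : (pvNjoin b.2.1 ≠ "") ↔ (b.2.1 ≠ [] ∧ 0 < b.2.2) := by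
        rw [hcl]
        constructor
        · intro hx; exact ⟨hne, (pvStrLen_pos_iff _).mpr hx⟩
        · intro hx; exact (pvStrLen_pos_iff _).mp hx.2
      by_cases hf : pvNjoin b.2.1 ≠ ""
      · rw [if_pos hf, if_pos (hflush.mp hf)]
        have hgood' : ∀ g ∈ b.1 ++ [b.2.1], g ≠ [] := by
          intro g hg
          rcases List.mem_append.mp hg with h' | h'
          · exact hgood g h'
          · simpa using (by simpa using h' : g = b.2.1) ▸ hne
        have := pvWhile_rounds tm 0 (b.1 ++ [b.2.1]) hgood'
        rw [pvChunk_zero_map] at this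
        rw [show b.1.map pvNjoin ++ [pvNjoin b.2.1] = (b.1 ++ [b.2.1]).map pvNjoin from by simp]
        rw [this]
        congr 2
        simp
      · rw [if_neg hf, if_neg (fun hx => hf (hflush.mpr hx))]
        have := pvWhile_rounds tm 0 b.1 hgood
        rw [pvChunk_zero_map] at this
        rw [this]
        congr 2
        simp
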